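-- pv_equiv track=rewrite | github.com/jaeyo03/CodingTest | Sort/programmers_147354.py | solution
-- ===== SOURCE A (Python) =====
-- def solution(data, col, row_begin, row_end):
--     answer = 0
--     # 마이너스를 활용하는거 기억하기!!
--     data.sort(key=lambda x: (x[col - 1], -x[0]))
--     S_i = []
--
--     for inx, d in enumerate(data):
--         total = 0
--         for num in d:
--             total += num % (inx + 1)
--         S_i.append(total)
--
--     for i in range(row_begin - 1, row_end):
--         if i == row_begin - 1:
--             answer = S_i[row_begin - 1]
--         else:
--             # python 에서 bitwise 는 ^ 이다.
--             answer = answer ^ S_i[i]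
--
--     return answer
-- ===== SOURCE B (Python) =====
-- # Walks only the requested block, back-to-front, indexing the sorted rows directly:
-- # no S_i table and no mod-sums for rows outside the block (XOR commutes, so order is immaterial).
-- # Like A, this sorts `data` in place; the equivalence claimed is about the return value.
-- def solution(data, col, row_begin, row_end):
--     data.sort(key=lambda x: (x[col - 1], -x[0]))
--     answer = 0
--     i = row_end - 1
--     while i >= row_begin - 1:
--         total = 0
--         for num in data[i]:
--             total += num % (i + 1)
--         answer ^= total
--         i -= 1
--     return answer
-- ===== Notes on version B (the rewrite author's own statement) =====
-- stated objective: alternative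
-- what changed: B deletes A's full S_i table and its staged XOR pass: after the same in-place sort it walks only the requested block back-to-front with a while loop, indexing the sorted rows directly and XOR-ing each block row's mod-sum into a single accumulator (XOR is commutative, so the reversed order is provably immaterial); rows outside the block are never summed.
-- outside the precondition, e.g. on solution([[1], [3]], 1, 0, 1): A returns 1, B raises ZeroDivisionError; on solution([[1], [3]], 1, -1, 0): A returns 1, B raises ZeroDivisionError
import Mathlib
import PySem

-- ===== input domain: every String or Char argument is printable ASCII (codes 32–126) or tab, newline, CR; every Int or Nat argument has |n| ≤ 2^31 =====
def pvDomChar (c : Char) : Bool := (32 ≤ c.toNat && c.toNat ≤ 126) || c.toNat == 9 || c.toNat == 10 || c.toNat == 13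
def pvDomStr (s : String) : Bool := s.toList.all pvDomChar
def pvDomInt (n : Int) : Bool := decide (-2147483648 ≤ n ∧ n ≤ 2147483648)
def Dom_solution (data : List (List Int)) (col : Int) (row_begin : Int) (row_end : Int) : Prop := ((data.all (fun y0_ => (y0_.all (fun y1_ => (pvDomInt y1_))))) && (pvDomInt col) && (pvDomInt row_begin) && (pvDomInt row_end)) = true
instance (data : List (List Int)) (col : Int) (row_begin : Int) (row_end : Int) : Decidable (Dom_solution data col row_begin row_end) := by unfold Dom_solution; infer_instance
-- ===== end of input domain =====

-- B drops A's full S_i table and its staged XOR pass: it walks only the requested block,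
-- back-to-front, XOR-ing each block row's mod-sum directly (objective: alternative).
-- Both Pythons sort `data` in place (the identical sort); the equivalence proved is about the return value.

-- ===== PORT A =====
-- shared helper: `data.sort(key=lambda x: (x[col-1], -x[0]))` — the identical line in both Pythons
def pvSortRows (data : List (List Int)) (col : Int) : List (List Int) :=
  PySem.List.sorted2 data (fun x => PySem.List.pyGetD x (col - 1) 0)
    (fun x => -(PySem.List.pyGetD x 0 0)) false

def solution (data : List (List Int)) (col : Int) (row_begin : Int) (row_end : Int) : Int :=
  let d := pvSortRows data col
  let S : List Int := (PySem.List.enumerate d 0).foldl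
    (fun acc p => acc ++ [p.2.foldl (fun total num => total + PySem.Int.mod num (p.1 + 1)) 0]) []
  (PySem.List.pyRange (row_begin - 1) row_end 1).foldl
    (fun answer i =>
      if i = row_begin - 1 then PySem.List.pyGetD S (row_begin - 1) 0
      else PySem.Int.bxor answer (PySem.List.pyGetD S i 0)) 0

-- ===== PORT B =====
-- the `while i >= row_begin - 1` loop of Source B, state (i, answer), counting i down
def pvWhileB (L : List (List Int)) (rb1 : Int) (i : Int) (answer : Int) : Int :=
  if _h : rb1 ≤ i then
    pvWhileB L rb1 (i - 1)
      (PySem.Int.bxor answer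
        ((PySem.List.pyGetD L i []).foldl (fun total num => total + PySem.Int.mod num (i + 1)) 0))
  else answer
termination_by (i - rb1 + 1).toNat
decreasing_by omega

def solution_alt (data : List (List Int)) (col : Int) (row_begin : Int) (row_end : Int) : Int :=
  pvWhileB (pvSortRows data col) (row_begin - 1) (row_end - 1) 0

-- ===== PRECONDITION & SPEC =====
-- Pre_ excludes exactly (a) inputs where A raises (col-1 not a valid Python index into some
-- row during the sort, or an S_i[i] index outside -len..len-1, in particular a non-empty
-- range with row_end > len), and (b) non-empty index ranges starting before row 1
-- (row_begin ≤ 0): there A XORs totals of trailing rows through negative-index wraparound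
-- while B's loop reaches i = -1 and raises ZeroDivisionError on num % 0.
def Pre_solution (data : List (List Int)) (col : Int) (row_begin : Int) (row_end : Int) : Prop :=
  (∀ row ∈ data, PySem.Raise.InRange row.length (col - 1)) ∧
  (row_begin - 1 < row_end → 1 ≤ row_begin ∧ row_end ≤ (data.length : Int))
instance (data : List (List Int)) (col : Int) (row_begin : Int) (row_end : Int) : Decidable (Pre_solution data col row_begin row_end) := by unfold Pre_solution; infer_instance

def pvWitness_solution : List (List Int) × Int × Int × Int := ([[1], [2]], 1, 1, 2)

def Spec_solution (data : List (List Int)) (col : Int) (row_begin : Int) (row_end : Int) (out : Int) : Prop := out = solution_alt data col row_begin row_end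
instance (data : List (List Int)) (col : Int) (row_begin : Int) (row_end : Int) (out : Int) : Decidable (Spec_solution data col row_begin row_end out) := by unfold Spec_solution; infer_instance

-- ===== CLAIM (what is proved, stated in full; the proofs are below) =====
def Claim_equal_solution : Prop := ∀ (data : List (List Int)) (col : Int) (row_begin : Int) (row_end : Int), Dom_solution data col row_begin row_end → Pre_solution data col row_begin row_end → Spec_solution data col row_begin row_end (solution data col row_begin row_end)

-- ===== LEMMAS AND PROOFS =====

-- PySem.Int.bxor is Mathlib's Int.xor, hence associative
theorem pv_bxor_eq_xor (a b : Int) : PySem.Int.bxor a b = Int.xor a b := by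
  unfold PySem.Int.bxor
  rcases a with m | m <;> rcases b with n | n <;>
    simp [Int.negSucc_eq, Int.xor] <;> omega

theorem pv_bxor_assoc (a b c : Int) :
    PySem.Int.bxor (PySem.Int.bxor a b) c = PySem.Int.bxor a (PySem.Int.bxor b c) := by
  simp only [pv_bxor_eq_xor]
  rcases a with m | m <;> rcases b with n | n <;> rcases c with k | k <;>
    simp [Int.xor, Nat.xor_assoc]

theorem pv_zero_bxor (a : Int) : PySem.Int.bxor 0 a = a := by
  rw [PySem.Int.bxor_comm, PySem.Int.bxor_zero]

-- the mod-sum of the row sitting at index j of the sorted list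
def pvT (L : List (List Int)) (j : Int) : Int :=
  (PySem.List.pyGetD L j []).foldl (fun t num => t + PySem.Int.mod num (j + 1)) 0

-- A's S_i list is the list of pvT values over the index range of the sorted list
theorem pvS_eq (L : List (List Int)) :
    (PySem.List.enumerate L 0).foldl
      (fun acc p => acc ++ [p.2.foldl (fun total num => total + PySem.Int.mod num (p.1 + 1)) 0]) []
    = (PySem.List.pyRange 0 (PySem.List.len L) 1).map (pvT L) := by
  rw [PySem.List.foldl_append_singleton_eq_map, PySem.List.enumerate_eq_map_pyRange L []]
  rw [List.map_map]; rfl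

-- B's countdown while-loop equals the increasing foldl of bxor over the same index range
theorem pv_whileB_eq (L : List (List Int)) (rb1 : Int) (i : Int) (acc : Int) :
    pvWhileB L rb1 i acc
    = PySem.Int.bxor acc
        ((PySem.List.pyRange rb1 (i + 1) 1).foldl (fun a j => PySem.Int.bxor a (pvT L j)) 0) := by
  by_cases h : rb1 ≤ i
  case neg =>
    rw [pvWhileB, dif_neg h, PySem.List.pyRange_one_eq_nil (by omega), List.foldl_nil,
      PySem.Int.bxor_zero]

  case pos =>
    have := pv_whileB_eq L rb1 (i - 1) (PySem.Int.bxor acc (pvT L i))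
    rw [pvWhileB, dif_pos h]
    show pvWhileB L rb1 (i - 1) (PySem.Int.bxor acc (pvT L i)) = _
    rw [this]
    have hsplit : PySem.List.pyRange rb1 (i + 1) 1
        = PySem.List.pyRange rb1 i 1 ++ [i] := by
      have : (i - 1) + 1 = i := by omega
      rw [← this, PySem.List.pyRange_one_succ_right (by omega)]
    rw [hsplit, List.foldl_append, List.foldl_cons, List.foldl_nil]
    have : i - 1 + 1 = i := by omega
    rw [this, pv_bxor_assoc, PySem.Int.bxor_comm (pvT L i)]
termination_by (i - rb1 + 1).toNat
decreasing_by omega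

theorem pv_main (data : List (List Int)) (col rb re : Int)
    (hrng : rb - 1 < re → 1 ≤ rb ∧ re ≤ (data.length : Int)) :
    solution data col rb re = solution_alt data col rb re := by
  set L := pvSortRows data col with hLdef
  have hlen : L.length = data.length := (PySem.List.sorted2_perm _ _ _ _).length_eq
  have hn : PySem.List.len L = (data.length : Int) := by rw [PySem.List.len_eq, hlen]
  unfold solution_alt
  rw [← hLdef, pv_whileB_eq, pv_zero_bxor]
  show (PySem.List.pyRange (rb - 1) re 1).foldl
      (fun answer i =>
        if i = rb - 1 then
          PySem.List.pyGetD ((PySem.List.enumerate L 0).foldl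
            (fun acc p => acc ++ [p.2.foldl (fun total num => total + PySem.Int.mod num (p.1 + 1)) 0]) []) (rb - 1) 0
        else PySem.Int.bxor answer (PySem.List.pyGetD ((PySem.List.enumerate L 0).foldl
            (fun acc p => acc ++ [p.2.foldl (fun total num => total + PySem.Int.mod num (p.1 + 1)) 0]) []) i 0)) 0
    = _
  rw [pvS_eq L]
  by_cases hne : rb - 1 < re
  case neg =>
    -- empty index range: both sides are the empty fold
    rw [PySem.List.pyRange_one_eq_nil (a := rb - 1) (b := re) (by omega),
      PySem.List.pyRange_one_eq_nil (a := rb - 1) (b := re - 1 + 1) (by omega),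
      List.foldl_nil, List.foldl_nil]
  case pos =>
  obtain ⟨hrb, hhi⟩ := hrng hne
  have hre : re - 1 + 1 = re := by omega
  rw [hre]
  rw [PySem.List.pyRange_one_cons hne, List.foldl_cons, List.foldl_cons]
  rw [if_pos rfl,
    PySem.List.pyGetD_map_pyRange_of_nonneg (pvT L) _ _ 0 (by omega) (by rw [hn]; omega),
    pv_zero_bxor]
  exact PySem.List.foldl_congr_mem _ _ _ _ (by
    intro ans i hi
    have hm := PySem.List.mem_pyRange_one.mp hi
    rw [if_neg (by omega),
      PySem.List.pyGetD_map_pyRange_of_nonneg (pvT L) _ _ 0 (by omega) (by rw [hn]; omega)])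

-- ===== VERDICT (by name: the statement is the Claim_ definition above) =====
theorem solution_spec : Claim_equal_solution := by
  intro data col row_begin row_end _hDom hPre
  exact pv_main data col row_begin row_end hPre.2
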